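-- pv_equiv track=rewrite | github.com/kooorvo/NetCalc-IP | src/root_cs.py | dec_to_bits
-- ===== SOURCE A (Python) =====
-- def dec_to_bits(dec):
--     assert 0 <= dec <= 255
--     bits = [0]*8
--     i = 7
--     while dec > 0:
--         bits[i] = dec % 2
--         dec //= 2
--         i -= 1
--     return bits
-- ===== SOURCE B (Python) =====
-- def dec_to_bits(dec):
--     assert 0 <= dec <= 255
--     return [int(c) for c in format(dec, '08b')]
-- ===== Notes on version B (the rewrite author's own statement) =====
-- stated objective: idiomatic
-- what changed: Replaces the manual backwards-filling divmod loop over a preallocated list with string formatting via format(dec, '08b') and a per-character int() comprehension.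
import Mathlib
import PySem

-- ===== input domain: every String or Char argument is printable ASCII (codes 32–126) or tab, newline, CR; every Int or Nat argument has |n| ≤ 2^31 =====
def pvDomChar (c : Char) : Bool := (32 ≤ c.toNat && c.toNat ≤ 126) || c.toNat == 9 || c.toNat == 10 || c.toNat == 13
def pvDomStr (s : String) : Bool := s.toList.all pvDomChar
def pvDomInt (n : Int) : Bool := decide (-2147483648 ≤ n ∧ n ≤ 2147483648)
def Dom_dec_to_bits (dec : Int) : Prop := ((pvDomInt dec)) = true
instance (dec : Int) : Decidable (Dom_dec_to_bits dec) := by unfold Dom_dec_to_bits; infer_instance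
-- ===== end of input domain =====

-- B replaces A's backwards-filling divmod loop with binary string formatting ('08b') and a per-character digit conversion (objective: idiomatic).

-- ===== PORT A =====
-- while dec > 0: bits[i] = dec % 2; dec //= 2; i -= 1
def decToBitsLoop (fuel : Nat) (dec : Int) (bits : List Int) (i : Int) : List Int :=
  match fuel with
  | 0 => bits
  | fuel + 1 =>
    if dec > 0 then
      decToBitsLoop fuel (PySem.Int.floordiv dec 2)
        (PySem.List.pySetD bits i (PySem.Int.mod dec 2)) (i - 1)
    else bits

def dec_to_bits (dec : Int) : List Int :=
  decToBitsLoop dec.toNat dec (List.replicate 8 0) 7  -- fuel dec.toNat: the value strictly halves each step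

-- ===== PORT B =====
-- binary digits of n, MSB first (n > 0); empty for 0
def binCharsAux (fuel n : Nat) : List Char :=
  match fuel with
  | 0 => []
  | fuel + 1 =>
    if n = 0 then []
    else binCharsAux fuel (n / 2) ++ [if n % 2 = 1 then '1' else '0']

def binChars (n : Nat) : List Char := binCharsAux n n  -- fuel n: n strictly halves each step

-- format(dec, '08b') for 0 <= dec: minimal binary string, left-padded with '0' to width 8
def pyFormat08b (dec : Int) : List Char :=
  let s := if dec = 0 then ['0'] else binChars dec.toNat
  List.replicate (8 - s.length) '0' ++ s

-- [int(c) for c in format(dec, '08b')]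
def dec_to_bits_alt (dec : Int) : List Int :=
  (pyFormat08b dec).map (fun c => (c.toNat : Int) - 48)

-- ===== PRECONDITION & SPEC =====
-- Pre_ excludes exactly the inputs where A's assert fails (AssertionError)
def Pre_dec_to_bits (dec : Int) : Prop := 0 ≤ dec ∧ dec ≤ 255
instance (dec : Int) : Decidable (Pre_dec_to_bits dec) := by unfold Pre_dec_to_bits; infer_instance
def pvWitness_dec_to_bits : Int := (170)

def Spec_dec_to_bits (dec : Int) (out : List Int) : Prop := out = dec_to_bits_alt dec
instance (dec : Int) (out : List Int) : Decidable (Spec_dec_to_bits dec out) := by unfold Spec_dec_to_bits; infer_instance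

-- ===== CLAIM (what is proved, stated in full; the proofs are below) =====
def Claim_equal_dec_to_bits : Prop := ∀ (dec : Int), Dom_dec_to_bits dec → Pre_dec_to_bits dec → Spec_dec_to_bits dec (dec_to_bits dec)

-- ===== LEMMAS AND PROOFS =====
set_option maxRecDepth 100000 in
theorem dec_to_bits_key : ∀ n : Fin 256, dec_to_bits (n.val : Int) = dec_to_bits_alt (n.val : Int) := by decide

-- ===== VERDICT (by name: the statement is the Claim_ definition above) =====
theorem dec_to_bits_spec : Claim_equal_dec_to_bits := by
  intro dec _ hpre
  unfold Spec_dec_to_bits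
  obtain ⟨h0, h255⟩ := hpre
  have hlt : dec.toNat < 256 := by omega
  have := dec_to_bits_key ⟨dec.toNat, hlt⟩
  simpa [Int.toNat_of_nonneg h0] using this
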